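-- pv_equiv track=rewrite | github.com/elarcanista/CP-Solutions | HackerRank/prepare/algorithms/implementation/bomber-man.py | step
-- ===== SOURCE A (Python) =====
-- from copy import deepcopy
--
-- def neighbours(rows, columns, r, c):
--     ans = [(r, c)]
--     if r > 0:
--         ans.append((r-1, c))
--     if r < rows - 1:
--         ans.append((r+1, c))
--     if c > 0:
--         ans.append((r, c-1))
--     if c < columns - 1:
--         ans.append((r, c+1))
--     return ans
--
-- def step(grid, rows, columns, detonate):
--     new_grid = deepcopy(grid)
--     for r in range(rows):
--         for c in range(columns):
--             if not detonate:
--                 new_grid[r][c] += 1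
--                 continue
--             if grid[r][c] == 2:
--                 for i, j in neighbours(rows, columns, r, c):
--                     new_grid[i][j] = 0
--     return new_grid
-- ===== SOURCE B (Python) =====
-- def step(grid, rows, columns, detonate):
--     new_grid = [row[:] for row in grid]
--     if not detonate:
--         for r in range(rows):
--             for c in range(columns):
--                 new_grid[r][c] = grid[r][c] + 1
--         return new_grid
--
--     def boom(r, c):
--         return (grid[r][c] == 2
--                 or (r > 0 and grid[r - 1][c] == 2)
--                 or (r + 1 < rows and grid[r + 1][c] == 2)
--                 or (c > 0 and grid[r][c - 1] == 2)
--                 or (c + 1 < columns and grid[r][c + 1] == 2))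
--
--     for r in range(rows):
--         for c in range(columns):
--             new_grid[r][c] = 0 if boom(r, c) else grid[r][c]
--     return new_grid
-- ===== Notes on version B (the rewrite author's own statement) =====
-- stated objective: simpler
-- what changed: B replaces A's deepcopy-and-scatter (writing 0 into the four neighbours of every bomb in a mutable deep copy) by a gather: it takes a plain row copy and recomputes each board cell once from the original grid (cell+1, or 0 iff the cell or an in-bounds neighbour holds a bomb), so no deepcopy and no neighbour writes; Pre_ excludes only inputs where both raise IndexError (board dimensions exceeding the grid).
import Mathlib
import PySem

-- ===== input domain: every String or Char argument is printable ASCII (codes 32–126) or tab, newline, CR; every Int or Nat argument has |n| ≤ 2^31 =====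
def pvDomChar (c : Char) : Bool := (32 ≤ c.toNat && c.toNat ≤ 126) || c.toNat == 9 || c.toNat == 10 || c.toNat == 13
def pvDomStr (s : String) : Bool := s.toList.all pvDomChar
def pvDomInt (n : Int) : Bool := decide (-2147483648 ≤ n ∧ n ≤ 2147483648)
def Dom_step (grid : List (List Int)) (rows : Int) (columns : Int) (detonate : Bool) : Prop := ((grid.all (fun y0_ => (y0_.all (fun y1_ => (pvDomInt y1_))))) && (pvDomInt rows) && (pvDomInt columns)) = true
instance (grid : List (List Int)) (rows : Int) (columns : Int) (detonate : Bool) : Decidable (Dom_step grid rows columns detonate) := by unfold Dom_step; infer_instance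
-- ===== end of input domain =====

-- One Bomberman step. B replaces A's deepcopy-and-scatter (writing 0 into the neighbours of
-- every bomb in a mutable deep copy) by a gather: a plain row copy in which each board cell is
-- recomputed once from the ORIGINAL grid (objective: simpler).

-- ===== PORT A =====
-- reads/writes grid[r][c]: all indices reached under Pre_step are in range (Python raises
-- IndexError outside Pre_step), so pyGetD / List.modify / List.set are exact there.
def pvCell (g : List (List Int)) (r c : Int) : Int :=
  PySem.List.pyGetD (PySem.List.pyGetD g r []) c 0

def pvNeighbours (rows columns r c : Int) : List (Int × Int) :=
  let a0 := [(r, c)]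
  let a1 := if r > 0 then a0 ++ [(r - 1, c)] else a0
  let a2 := if r < rows - 1 then a1 ++ [(r + 1, c)] else a1
  let a3 := if c > 0 then a2 ++ [(r, c - 1)] else a2
  if c < columns - 1 then a3 ++ [(r, c + 1)] else a3

def pvSet0 (g : List (List Int)) (i j : Int) : List (List Int) :=
  g.modify i.toNat (fun row => row.set j.toNat (0 : Int))

def step (grid : List (List Int)) (rows : Int) (columns : Int) (detonate : Bool) : List (List Int) :=
  (PySem.List.pyRange 0 rows 1).foldl (fun ng r =>
    (PySem.List.pyRange 0 columns 1).foldl (fun ng c =>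
      if !detonate then
        ng.modify r.toNat (fun row => row.modify c.toNat (· + 1))
      else if pvCell grid r c == 2 then
        (pvNeighbours rows columns r c).foldl (fun ng p => pvSet0 ng p.1 p.2) ng
      else ng) ng) grid

-- ===== PORT B =====
-- Source B's boom(r, c): the cell or one of its in-bounds orthogonal neighbours holds a bomb.
def pvBoom (grid : List (List Int)) (rows columns r c : Int) : Bool :=
  (pvCell grid r c == 2) ||
  (decide (r > 0) && (pvCell grid (r - 1) c == 2)) ||
  (decide (r + 1 < rows) && (pvCell grid (r + 1) c == 2)) ||
  (decide (c > 0) && (pvCell grid r (c - 1) == 2)) ||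
  (decide (c + 1 < columns) && (pvCell grid r (c + 1) == 2))

-- Source B's 'new_grid = [row[:] for row in grid]' is the identity on a pure value; each write
-- 'new_grid[r][c] = x' is modify/set; the written value is read from the ORIGINAL grid.
def step_alt (grid : List (List Int)) (rows : Int) (columns : Int) (detonate : Bool) : List (List Int) :=
  if !detonate then
    (PySem.List.pyRange 0 rows 1).foldl (fun ng r =>
      (PySem.List.pyRange 0 columns 1).foldl (fun ng c =>
        ng.modify r.toNat (fun row => row.set c.toNat (pvCell grid r c + 1))) ng) grid
  else
    (PySem.List.pyRange 0 rows 1).foldl (fun ng r =>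
      (PySem.List.pyRange 0 columns 1).foldl (fun ng c =>
        ng.modify r.toNat (fun row => row.set c.toNat
          (if pvBoom grid rows columns r c then 0 else pvCell grid r c))) ng) grid

-- ===== PRECONDITION & SPEC =====
-- Pre_step excludes exactly the inputs on which A (and B alike) raises IndexError: rows/columns
-- positive but exceeding the grid's actual dimensions (including ragged rows shorter than columns).
def Pre_step (grid : List (List Int)) (rows : Int) (columns : Int) (detonate : Bool) : Prop :=
  columns ≤ 0 ∨ rows ≤ 0 ∨
    (rows ≤ (grid.length : Int) ∧ ∀ row ∈ grid.take rows.toNat, columns ≤ (row.length : Int))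
instance (grid : List (List Int)) (rows : Int) (columns : Int) (detonate : Bool) : Decidable (Pre_step grid rows columns detonate) := by unfold Pre_step; infer_instance

def pvWitness_step : List (List Int) × Int × Int × Bool := ([[2, 1], [1, 1]], 2, 2, true)

def Spec_step (grid : List (List Int)) (rows : Int) (columns : Int) (detonate : Bool) (out : List (List Int)) : Prop := out = step_alt grid rows columns detonate
instance (grid : List (List Int)) (rows : Int) (columns : Int) (detonate : Bool) (out : List (List Int)) : Decidable (Spec_step grid rows columns detonate out) := by unfold Spec_step; infer_instance

-- ===== CLAIM (what is proved, stated in full; the proofs are below) =====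
def Claim_equal_step : Prop := ∀ (grid : List (List Int)) (rows : Int) (columns : Int) (detonate : Bool), Dom_step grid rows columns detonate → Pre_step grid rows columns detonate → Spec_step grid rows columns detonate (step grid rows columns detonate)

-- ===== LEMMAS AND PROOFS =====

-- cell reading with Nat indices, and shape equality of two grids
def cell2 (g : List (List Int)) (i j : Nat) : Int := (g.getD i []).getD j 0
def shEq (a b : List (List Int)) : Prop :=
  a.length = b.length ∧ ∀ i, (a.getD i []).length = (b.getD i []).length

theorem shEq_refl (a : List (List Int)) : shEq a a := ⟨rfl, fun _ => rfl⟩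

theorem shEq_trans {a b c : List (List Int)} (h1 : shEq a b) (h2 : shEq b c) : shEq a c :=
  ⟨h1.1.trans h2.1, fun i => (h1.2 i).trans (h2.2 i)⟩

theorem getD_modify' {α : Type} (l : List α) (c j : Nat) (f : α → α) (d : α) :
    (l.modify c f).getD j d = if c = j ∧ j < l.length then f (l.getD j d) else l.getD j d := by
  rw [List.getD_eq_getElem?_getD, List.getD_eq_getElem?_getD, List.getElem?_modify]
  rcases h : l[j]? with _ | a
  · have hl : ¬ j < l.length := by simpa [List.getElem?_eq_none_iff] using h
    simp [hl]
  · have hl : j < l.length := by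
      rcases List.getElem?_eq_some_iff.mp h with ⟨hlt, _⟩; exact hlt
    simp [hl]

theorem getD_set' {α : Type} (l : List α) (c j : Nat) (a d : α) :
    (l.set c a).getD j d = if c = j ∧ j < l.length then a else l.getD j d := by
  rw [List.getD_eq_getElem?_getD, List.getD_eq_getElem?_getD, List.getElem?_set]
  by_cases h1 : c = j
  · subst h1
    by_cases h2 : c < l.length
    · simp [h2]
    · simp [h2]
  · simp [h1]

theorem sh_modify (g : List (List Int)) (r : Nat) (F : List Int → List Int)
    (hF : ∀ row, (F row).length = row.length) : shEq (g.modify r F) g := by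
  refine ⟨List.length_modify F g r, fun i => ?_⟩
  rw [getD_modify']
  split_ifs <;> simp [hF]

theorem cell_modify (g : List (List Int)) (r c i j : Nat) (f : Int → Int) :
    cell2 (g.modify r (fun row => row.modify c f)) i j =
      if i = r ∧ j = c ∧ r < g.length ∧ c < (g.getD r []).length
      then f (cell2 g i j) else cell2 g i j := by
  unfold cell2
  rw [getD_modify']
  by_cases h : r = i ∧ i < g.length
  · rw [if_pos h, getD_modify']
    obtain ⟨h1, h2⟩ := h; subst h1
    have hcond : (c = j ∧ j < (g.getD r []).length) ↔
        (r = r ∧ j = c ∧ r < g.length ∧ c < (g.getD r []).length) := by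
      constructor
      · rintro ⟨rfl, hj⟩; exact ⟨rfl, rfl, h2, hj⟩
      · rintro ⟨-, rfl, -, hc⟩; exact ⟨rfl, hc⟩
    rw [if_congr hcond rfl rfl]
  · rw [if_neg h]
    have hneg : ¬(i = r ∧ j = c ∧ r < g.length ∧ c < (g.getD r []).length) := by
      rintro ⟨rfl, -, hr, -⟩; exact h ⟨rfl, hr⟩
    rw [if_neg hneg]

theorem cell_setv (g : List (List Int)) (r c i j : Nat) (a : Int) :
    cell2 (g.modify r (fun row => row.set c a)) i j =
      if i = r ∧ j = c ∧ r < g.length ∧ c < (g.getD r []).length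
      then a else cell2 g i j := by
  unfold cell2
  rw [getD_modify']
  by_cases h : r = i ∧ i < g.length
  · rw [if_pos h, getD_set']
    obtain ⟨h1, h2⟩ := h; subst h1
    have hcond : (c = j ∧ j < (g.getD r []).length) ↔
        (r = r ∧ j = c ∧ r < g.length ∧ c < (g.getD r []).length) := by
      constructor
      · rintro ⟨rfl, hj⟩; exact ⟨rfl, rfl, h2, hj⟩
      · rintro ⟨-, rfl, -, hc⟩; exact ⟨rfl, hc⟩
    rw [if_congr hcond rfl rfl]
  · rw [if_neg h]
    have hneg : ¬(i = r ∧ j = c ∧ r < g.length ∧ c < (g.getD r []).length) := by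
      rintro ⟨rfl, -, hr, -⟩; exact h ⟨rfl, hr⟩
    rw [if_neg hneg]

theorem foldl_shEq {α : Type} (L : List α) (f : List (List Int) → α → List (List Int))
    (h : ∀ g x, shEq (f g x) g) : ∀ g, shEq (L.foldl f g) g := by
  induction L with
  | nil => exact fun g => shEq_refl g
  | cons x xs ih => intro g; exact shEq_trans (ih (f g x)) (h g x)

-- ---------- A's non-detonate branch ----------

theorem incInner_sh (r M : Nat) (g : List (List Int)) :
    shEq ((List.range M).foldl (fun ng c => ng.modify r (fun row => row.modify c (· + 1))) g) g :=
  foldl_shEq (List.range M) _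
    (fun g c => sh_modify g r _ (fun row => List.length_modify _ row c)) g

theorem incInner (r : Nat) (M : Nat) : ∀ (g : List (List Int)) (i j : Nat),
    cell2 ((List.range M).foldl (fun ng c => ng.modify r (fun row => row.modify c (· + 1))) g) i j =
      if i = r ∧ j < M ∧ r < g.length ∧ j < (g.getD r []).length
      then cell2 g i j + 1 else cell2 g i j := by
  induction M with
  | zero => intro g i j; simp
  | succ M ih =>
    intro g i j
    rw [List.range_succ, List.foldl_append, List.foldl_cons, List.foldl_nil, cell_modify]
    have hs := incInner_sh r M g
    rw [hs.1, hs.2 r, ih g i j]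
    split_ifs <;> omega

theorem incOuter_sh (N M : Nat) (g : List (List Int)) :
    shEq ((List.range N).foldl (fun ng r =>
        (List.range M).foldl (fun ng c => ng.modify r (fun row => row.modify c (· + 1))) ng) g) g :=
  foldl_shEq (List.range N) _ (fun g r => incInner_sh r M g) g

theorem incOuter (N M : Nat) : ∀ (g : List (List Int)) (i j : Nat),
    cell2 ((List.range N).foldl (fun ng r =>
        (List.range M).foldl (fun ng c => ng.modify r (fun row => row.modify c (· + 1))) ng) g) i j =
      if i < N ∧ j < M ∧ i < g.length ∧ j < (g.getD i []).length
      then cell2 g i j + 1 else cell2 g i j := by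
  induction N with
  | zero => intro g i j; simp
  | succ N ih =>
    intro g i j
    rw [List.range_succ, List.foldl_append, List.foldl_cons, List.foldl_nil, incInner]
    have hs := incOuter_sh N M g
    rw [hs.1, hs.2 N, ih g i j]
    by_cases hiN : i = N
    · subst hiN; split_ifs <;> omega
    · split_ifs <;> omega

-- ---------- B's write loop: each board cell set once, from a fixed function of (r, c) ----------

theorem setInner_sh (r M : Nat) (f : Nat → Int) (g : List (List Int)) :
    shEq ((List.range M).foldl (fun ng c => ng.modify r (fun row => row.set c (f c))) g) g :=
  foldl_shEq (List.range M) _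
    (fun g c => sh_modify g r _ (fun row => by simp)) g

theorem setInner (r : Nat) (f : Nat → Int) (M : Nat) : ∀ (g : List (List Int)) (i j : Nat),
    cell2 ((List.range M).foldl (fun ng c => ng.modify r (fun row => row.set c (f c))) g) i j =
      if i = r ∧ j < M ∧ r < g.length ∧ j < (g.getD r []).length
      then f j else cell2 g i j := by
  induction M with
  | zero => intro g i j; simp
  | succ M ih =>
    intro g i j
    rw [List.range_succ, List.foldl_append, List.foldl_cons, List.foldl_nil, cell_setv]
    have hs := setInner_sh r M f g
    rw [hs.1, hs.2 r, ih g i j]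
    by_cases hjM : j = M
    · subst hjM; split_ifs <;> first | rfl | omega
    · split_ifs <;> first | rfl | omega

theorem setOuter_sh (N M : Nat) (f : Nat → Nat → Int) (g : List (List Int)) :
    shEq ((List.range N).foldl (fun ng r =>
        (List.range M).foldl (fun ng c => ng.modify r (fun row => row.set c (f r c))) ng) g) g :=
  foldl_shEq (List.range N) _ (fun g r => setInner_sh r M (f r) g) g

theorem setOuter (f : Nat → Nat → Int) (M : Nat) (N : Nat) : ∀ (g : List (List Int)) (i j : Nat),
    cell2 ((List.range N).foldl (fun ng r =>
        (List.range M).foldl (fun ng c => ng.modify r (fun row => row.set c (f r c))) ng) g) i j =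
      if i < N ∧ j < M ∧ i < g.length ∧ j < (g.getD i []).length
      then f i j else cell2 g i j := by
  induction N with
  | zero => intro g i j; simp
  | succ N ih =>
    intro g i j
    rw [List.range_succ, List.foldl_append, List.foldl_cons, List.foldl_nil, setInner]
    have hs := setOuter_sh N M f g
    rw [hs.1, hs.2 N, ih g i j]
    by_cases hiN : i = N
    · subst hiN; split_ifs <;> first | rfl | omega
    · split_ifs <;> first | rfl | omega

-- ---------- A's detonate branch ----------

set_option maxHeartbeats 1000000 in
theorem mem_pvNeighbours (rows cols r c x y : Int) :
    (x, y) ∈ pvNeighbours rows cols r c ↔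
      ((x, y) = (r, c) ∨ (r > 0 ∧ (x, y) = (r - 1, c)) ∨ (r < rows - 1 ∧ (x, y) = (r + 1, c)) ∨
       (c > 0 ∧ (x, y) = (r, c - 1)) ∨ (c < cols - 1 ∧ (x, y) = (r, c + 1))) := by
  unfold pvNeighbours
  split_ifs <;> simp_all [Prod.ext_iff] <;> omega

theorem sh_set0 (g : List (List Int)) (a b : Int) : shEq (pvSet0 g a b) g :=
  sh_modify g a.toNat _ (fun row => by simp)

theorem pvCell_nat (g : List (List Int)) (i j : Nat) :
    pvCell g (i : Int) (j : Int) = cell2 g i j := by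
  simp [pvCell, cell2, PySem.List.pyGetD_natCast]

-- frame hypothesis: the first rows.toNat × cols.toNat block is inside g's shape
def Frame (g : List (List Int)) (rows cols : Int) : Prop :=
  ∀ a b : Nat, a < rows.toNat → b < cols.toNat → a < g.length ∧ b < (g.getD a []).length

theorem frame_of_shEq {a g : List (List Int)} (rows cols : Int) (h : shEq a g)
    (hf : Frame g rows cols) : Frame a rows cols := by
  intro x y hx hy
  rw [h.1, h.2 x]
  exact hf x y hx hy

theorem scatter_sh (L : List (Int × Int)) (g : List (List Int)) :
    shEq (L.foldl (fun ng p => pvSet0 ng p.1 p.2) g) g :=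
  foldl_shEq L _ (fun g p => sh_set0 g p.1 p.2) g

theorem scatter_cell (L : List (Int × Int)) : ∀ (g : List (List Int)) (i j : Nat),
    (∀ p ∈ L, 0 ≤ p.1 ∧ 0 ≤ p.2 ∧ p.1.toNat < g.length ∧ p.2.toNat < (g.getD p.1.toNat []).length) →
    cell2 (L.foldl (fun ng p => pvSet0 ng p.1 p.2) g) i j =
      if ((i : Int), (j : Int)) ∈ L then 0 else cell2 g i j := by
  induction L with
  | nil => intro g i j _; simp
  | cons p L ih =>
    intro g i j hL
    have hp := hL p List.mem_cons_self
    have hsh := sh_set0 g p.1 p.2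
    rw [List.foldl_cons, ih (pvSet0 g p.1 p.2) i j ?side]
    case side =>
      intro q hq
      obtain ⟨h1, h2, h3, h4⟩ := hL q (List.mem_cons_of_mem p hq)
      exact ⟨h1, h2, by rw [hsh.1]; exact h3, by rw [hsh.2 q.1.toNat]; exact h4⟩
    have hset : cell2 (pvSet0 g p.1 p.2) i j =
        if i = p.1.toNat ∧ j = p.2.toNat ∧ p.1.toNat < g.length ∧
            p.2.toNat < (g.getD p.1.toNat []).length then 0 else cell2 g i j := by
      unfold pvSet0; exact cell_setv g p.1.toNat p.2.toNat i j 0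
    rw [hset]
    have hfull : (((i : Int), (j : Int)) = p) ↔
        (i = p.1.toNat ∧ j = p.2.toNat ∧ p.1.toNat < g.length ∧
          p.2.toNat < (g.getD p.1.toNat []).length) := by
      obtain ⟨hp1, hp2, hp3, hp4⟩ := hp
      cases p with
      | mk pa pb =>
        simp only [Prod.ext_iff]
        constructor
        · rintro ⟨rfl, rfl⟩; exact ⟨by omega, by omega, hp3, hp4⟩
        · rintro ⟨hi, hj, -, -⟩; constructor <;> omega
    by_cases hm : ((i : Int), (j : Int)) ∈ L
    · simp [hm, List.mem_cons]
    · simp only [List.mem_cons, hm, or_false, if_false]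
      exact if_congr hfull.symm rfl rfl

theorem nbrs_inframe (rows cols : Int) (r c : Nat) (hr : r < rows.toNat) (hc : c < cols.toNat) :
    ∀ p ∈ pvNeighbours rows cols (r : Int) (c : Int),
      0 ≤ p.1 ∧ 0 ≤ p.2 ∧ p.1.toNat < rows.toNat ∧ p.2.toNat < cols.toNat := by
  rintro ⟨x, y⟩ hp
  rw [mem_pvNeighbours] at hp
  simp only [Prod.mk.injEq] at hp
  omega

-- the body of A's detonate loop, and one full row of it
def detBody (g0 : List (List Int)) (rows cols : Int) (r : Nat) :
    List (List Int) → Nat → List (List Int) := fun ng c =>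
  if pvCell g0 (r : Int) (c : Int) == 2 then
    (pvNeighbours rows cols (r : Int) (c : Int)).foldl (fun ng p => pvSet0 ng p.1 p.2) ng
  else ng

def detRow (g0 : List (List Int)) (rows cols : Int) (r M : Nat) (g : List (List Int)) :
    List (List Int) := (List.range M).foldl (detBody g0 rows cols r) g

theorem detBody_sh (g0 : List (List Int)) (rows cols : Int) (r : Nat)
    (g : List (List Int)) (c : Nat) : shEq (detBody g0 rows cols r g c) g := by
  unfold detBody
  split_ifs
  · exact scatter_sh _ g
  · exact shEq_refl g

theorem detRow_sh (g0 : List (List Int)) (rows cols : Int) (r M : Nat) (g : List (List Int)) :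
    shEq (detRow g0 rows cols r M g) g :=
  foldl_shEq (List.range M) _ (detBody_sh g0 rows cols r) g

theorem detInner (g0 : List (List Int)) (rows cols : Int) (r : Nat) (hr : r < rows.toNat) :
    ∀ (M : Nat), M ≤ cols.toNat → ∀ (g : List (List Int)) (i j : Nat), Frame g rows cols →
    cell2 (detRow g0 rows cols r M g) i j =
      if (∃ c < M, cell2 g0 r c = 2 ∧
            ((i : Int), (j : Int)) ∈ pvNeighbours rows cols (r : Int) (c : Int))
      then 0 else cell2 g i j := by
  intro M
  induction M with
  | zero => intro _ g i j _; simp [detRow]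
  | succ M ih =>
    intro hM g i j hF
    unfold detRow
    rw [List.range_succ, List.foldl_append, List.foldl_cons, List.foldl_nil]
    have hshp := detRow_sh g0 rows cols r M g
    have hFp : Frame (detRow g0 rows cols r M g) rows cols := frame_of_shEq rows cols hshp hF
    show cell2 (detBody g0 rows cols r (detRow g0 rows cols r M g) M) i j = _
    unfold detBody
    rw [pvCell_nat]
    by_cases ht : cell2 g0 r M = 2
    · rw [if_pos (by simpa using ht)]
      rw [scatter_cell _ _ i j ?bounds]
      case bounds =>
        intro p hp
        obtain ⟨h1, h2, h3, h4⟩ := nbrs_inframe rows cols r M hr (by omega) p hp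
        obtain ⟨h5, h6⟩ := hFp p.1.toNat p.2.toNat h3 h4
        exact ⟨h1, h2, h5, h6⟩
      rw [ih (by omega) g i j hF]
      by_cases hm : ((i : Int), (j : Int)) ∈ pvNeighbours rows cols (r : Int) (M : Int)
      · rw [if_pos hm, if_pos ⟨M, by omega, ht, hm⟩]
      · rw [if_neg hm]
        have hiff : (∃ c < M, cell2 g0 r c = 2 ∧
              ((i : Int), (j : Int)) ∈ pvNeighbours rows cols (r : Int) (c : Int)) ↔
            (∃ c < M + 1, cell2 g0 r c = 2 ∧
              ((i : Int), (j : Int)) ∈ pvNeighbours rows cols (r : Int) (c : Int)) := by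
          constructor
          · rintro ⟨c, hc, h2, h3⟩; exact ⟨c, by omega, h2, h3⟩
          · rintro ⟨c, hc, h2, h3⟩
            rcases Nat.lt_succ_iff_lt_or_eq.mp hc with h | rfl
            · exact ⟨c, h, h2, h3⟩
            · exact absurd h3 hm
        exact if_congr hiff rfl rfl
    · rw [if_neg (by simpa using ht), ih (by omega) g i j hF]
      have hiff : (∃ c < M, cell2 g0 r c = 2 ∧
            ((i : Int), (j : Int)) ∈ pvNeighbours rows cols (r : Int) (c : Int)) ↔
          (∃ c < M + 1, cell2 g0 r c = 2 ∧
            ((i : Int), (j : Int)) ∈ pvNeighbours rows cols (r : Int) (c : Int)) := by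
        constructor
        · rintro ⟨c, hc, h2, h3⟩; exact ⟨c, by omega, h2, h3⟩
        · rintro ⟨c, hc, h2, h3⟩
          rcases Nat.lt_succ_iff_lt_or_eq.mp hc with h | rfl
          · exact ⟨c, h, h2, h3⟩
          · exact absurd h2 ht
      exact if_congr hiff rfl rfl

theorem detOuter (g0 : List (List Int)) (rows cols : Int) (M : Nat) (hM : M ≤ cols.toNat) :
    ∀ (N : Nat), N ≤ rows.toNat → ∀ (g : List (List Int)) (i j : Nat), Frame g rows cols →
    cell2 ((List.range N).foldl (fun ng r => detRow g0 rows cols r M ng) g) i j =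
      if (∃ r < N, ∃ c < M, cell2 g0 r c = 2 ∧
            ((i : Int), (j : Int)) ∈ pvNeighbours rows cols (r : Int) (c : Int))
      then 0 else cell2 g i j := by
  intro N
  induction N with
  | zero => intro _ g i j _; simp
  | succ N ih =>
    intro hN g i j hF
    rw [List.range_succ, List.foldl_append, List.foldl_cons, List.foldl_nil]
    have hshp : shEq ((List.range N).foldl (fun ng r => detRow g0 rows cols r M ng) g) g :=
      foldl_shEq (List.range N) _ (fun g r => detRow_sh g0 rows cols r M g) g
    have hFp := frame_of_shEq rows cols hshp hF
    rw [detInner g0 rows cols N (by omega) M hM _ i j hFp, ih (by omega) g i j hF]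
    by_cases hm : (∃ c < M, cell2 g0 N c = 2 ∧
        ((i : Int), (j : Int)) ∈ pvNeighbours rows cols (N : Int) (c : Int))
    · obtain ⟨c, hc, h2, h3⟩ := hm
      rw [if_pos ⟨c, hc, h2, h3⟩, if_pos ⟨N, by omega, c, hc, h2, h3⟩]
    · rw [if_neg hm]
      have hiff : (∃ r < N, ∃ c < M, cell2 g0 r c = 2 ∧
            ((i : Int), (j : Int)) ∈ pvNeighbours rows cols (r : Int) (c : Int)) ↔
          (∃ r < N + 1, ∃ c < M, cell2 g0 r c = 2 ∧
            ((i : Int), (j : Int)) ∈ pvNeighbours rows cols (r : Int) (c : Int)) := by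
        constructor
        · rintro ⟨r, hrlt, rest⟩; exact ⟨r, by omega, rest⟩
        · rintro ⟨r, hrlt, rest⟩
          rcases Nat.lt_succ_iff_lt_or_eq.mp hrlt with h | rfl
          · exact ⟨r, h, rest⟩
          · exact absurd rest hm
      exact if_congr hiff rfl rfl

theorem detOuter_sh (g0 : List (List Int)) (rows cols : Int) (N M : Nat) (g : List (List Int)) :
    shEq ((List.range N).foldl (fun ng r => detRow g0 rows cols r M ng) g) g :=
  foldl_shEq (List.range N) _ (fun g r => detRow_sh g0 rows cols r M g) g

theorem boom_iff (g : List (List Int)) (rows cols : Int) (i j : Nat)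
    (hi : i < rows.toNat) (hj : j < cols.toNat) :
    (pvBoom g rows cols (i : Int) (j : Int) = true) ↔
      (∃ r < rows.toNat, ∃ c < cols.toNat, cell2 g r c = 2 ∧
        ((i : Int), (j : Int)) ∈ pvNeighbours rows cols (r : Int) (c : Int)) := by
  unfold pvBoom
  simp only [Bool.or_eq_true, Bool.and_eq_true, beq_iff_eq, decide_eq_true_eq]
  constructor
  · rintro ((((h | ⟨hgt, hcell⟩) | ⟨hlt, hcell⟩) | ⟨hgt, hcell⟩) | ⟨hlt, hcell⟩)
    · refine ⟨i, hi, j, hj, by rwa [pvCell_nat] at h, ?_⟩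
      rw [mem_pvNeighbours]; exact Or.inl rfl
    · refine ⟨i - 1, by omega, j, hj, ?_, ?_⟩
      · have he : ((i : Int) - 1) = ((i - 1 : Nat) : Int) := by omega
        rwa [he, pvCell_nat] at hcell
      · rw [mem_pvNeighbours]
        refine Or.inr (Or.inr (Or.inl ⟨by omega, ?_⟩))
        simp only [Prod.mk.injEq]; refine ⟨?_, ?_⟩ <;> first | trivial | omega
    · refine ⟨i + 1, by omega, j, hj, ?_, ?_⟩
      · have he : ((i : Int) + 1) = ((i + 1 : Nat) : Int) := by omega
        rwa [he, pvCell_nat] at hcell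
      · rw [mem_pvNeighbours]
        refine Or.inr (Or.inl ⟨by omega, ?_⟩)
        simp only [Prod.mk.injEq]; refine ⟨?_, ?_⟩ <;> first | trivial | omega
    · refine ⟨i, hi, j - 1, by omega, ?_, ?_⟩
      · have he : ((j : Int) - 1) = ((j - 1 : Nat) : Int) := by omega
        rwa [he, pvCell_nat] at hcell
      · rw [mem_pvNeighbours]
        refine Or.inr (Or.inr (Or.inr (Or.inr ⟨by omega, ?_⟩)))
        simp only [Prod.mk.injEq]; refine ⟨?_, ?_⟩ <;> first | trivial | omega
    · refine ⟨i, hi, j + 1, by omega, ?_, ?_⟩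
      · have he : ((j : Int) + 1) = ((j + 1 : Nat) : Int) := by omega
        rwa [he, pvCell_nat] at hcell
      · rw [mem_pvNeighbours]
        refine Or.inr (Or.inr (Or.inr (Or.inl ⟨by omega, ?_⟩)))
        simp only [Prod.mk.injEq]; refine ⟨?_, ?_⟩ <;> first | trivial | omega
  · rintro ⟨r, hr, c, hc, hcell, hmem⟩
    rw [mem_pvNeighbours] at hmem
    simp only [Prod.mk.injEq] at hmem
    rcases hmem with ⟨e1, e2⟩ | ⟨hp, e1, e2⟩ | ⟨hp, e1, e2⟩ | ⟨hp, e1, e2⟩ | ⟨hp, e1, e2⟩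
    · refine Or.inl (Or.inl (Or.inl (Or.inl ?_)))
      have hri : r = i ∧ c = j := by omega
      rw [pvCell_nat, ← hri.1, ← hri.2]; exact hcell
    · refine Or.inl (Or.inl (Or.inr ⟨by omega, ?_⟩))
      have he : ((i : Int) + 1) = ((r : Nat) : Int) := by omega
      have hc' : ((j : Nat) : Int) = ((c : Nat) : Int) := by omega
      rw [he, hc', pvCell_nat]; exact hcell
    · refine Or.inl (Or.inl (Or.inl (Or.inr ⟨by omega, ?_⟩)))
      have he : ((i : Int) - 1) = ((r : Nat) : Int) := by omega
      have hc' : ((j : Nat) : Int) = ((c : Nat) : Int) := by omega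
      rw [he, hc', pvCell_nat]; exact hcell
    · refine Or.inr ⟨by omega, ?_⟩
      have he : ((j : Int) + 1) = ((c : Nat) : Int) := by omega
      have hr' : ((i : Nat) : Int) = ((r : Nat) : Int) := by omega
      rw [he, hr', pvCell_nat]; exact hcell
    · refine Or.inl (Or.inr ⟨by omega, ?_⟩)
      have he : ((j : Int) - 1) = ((c : Nat) : Int) := by omega
      have hr' : ((i : Nat) : Int) = ((r : Nat) : Int) := by omega
      rw [he, hr', pvCell_nat]; exact hcell

-- ---------- rewriting the ports into the List.range loop form ----------

theorem stepA_false (grid : List (List Int)) (rows cols : Int) :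
    step grid rows cols false =
      (List.range rows.toNat).foldl (fun ng r =>
        (List.range cols.toNat).foldl (fun ng c =>
          ng.modify r (fun row => row.modify c (· + 1))) ng) grid := by
  unfold step
  simp only [PySem.List.pyRange_one, List.foldl_map, zero_add, Int.toNat_natCast, sub_zero,
    Bool.not_false, if_true]

theorem stepA_true (grid : List (List Int)) (rows cols : Int) :
    step grid rows cols true =
      (List.range rows.toNat).foldl (fun ng r => detRow grid rows cols r cols.toNat ng) grid := by
  unfold step detRow detBody
  simp only [PySem.List.pyRange_one, List.foldl_map, zero_add, sub_zero,
    Bool.not_true, Bool.false_eq_true, if_false]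

theorem stepB_false (grid : List (List Int)) (rows cols : Int) :
    step_alt grid rows cols false =
      (List.range rows.toNat).foldl (fun ng r =>
        (List.range cols.toNat).foldl (fun ng c =>
          ng.modify r (fun row => row.set c (cell2 grid r c + 1))) ng) grid := by
  unfold step_alt
  simp only [PySem.List.pyRange_one, List.foldl_map, zero_add, Int.toNat_natCast, sub_zero,
    Bool.not_false, if_true, pvCell_nat]

theorem stepB_true (grid : List (List Int)) (rows cols : Int) :
    step_alt grid rows cols true =
      (List.range rows.toNat).foldl (fun ng r =>
        (List.range cols.toNat).foldl (fun ng c =>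
          ng.modify r (fun row => row.set c
            (if pvBoom grid rows cols (r : Int) (c : Int) then 0 else cell2 grid r c))) ng) grid := by
  unfold step_alt
  simp only [PySem.List.pyRange_one, List.foldl_map, zero_add, Int.toNat_natCast, sub_zero,
    Bool.not_true, Bool.false_eq_true, if_false, pvCell_nat]

theorem grids_ext (a b g : List (List Int)) (ha : shEq a g) (hb : shEq b g)
    (h : ∀ i j, i < g.length → j < (g.getD i []).length → cell2 a i j = cell2 b i j) : a = b := by
  apply List.ext_getElem?
  intro n
  by_cases hn : n < g.length
  · have hna : n < a.length := by rw [ha.1]; exact hn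
    have hnb : n < b.length := by rw [hb.1]; exact hn
    rw [List.getElem?_eq_getElem hna, List.getElem?_eq_getElem hnb]
    have hga : a.getD n [] = a[n] := List.getD_eq_getElem a [] hna
    have hgb : b.getD n [] = b[n] := List.getD_eq_getElem b [] hnb
    congr 1
    apply List.ext_getElem?
    intro m
    by_cases hm : m < (g.getD n []).length
    · have hma : m < a[n].length := by rw [← hga, ha.2 n]; exact hm
      have hmb : m < b[n].length := by rw [← hgb, hb.2 n]; exact hm
      rw [List.getElem?_eq_getElem hma, List.getElem?_eq_getElem hmb]
      have := h n m hn hm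
      rw [cell2, cell2, hga, hgb, List.getD_eq_getElem _ 0 hma, List.getD_eq_getElem _ 0 hmb]
        at this
      rw [this]
    · have hma : a[n].length ≤ m := by rw [← hga, ha.2 n]; omega
      have hmb : b[n].length ≤ m := by rw [← hgb, hb.2 n]; omega
      rw [List.getElem?_eq_none hma, List.getElem?_eq_none hmb]
  · rw [List.getElem?_eq_none (by rw [ha.1]; omega), List.getElem?_eq_none (by rw [hb.1]; omega)]

theorem frame_of_pre (grid : List (List Int)) (rows cols : Int) (det : Bool)
    (hpre : Pre_step grid rows cols det) : Frame grid rows cols := by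
  intro a b hA hB
  rcases hpre with h | h | ⟨h1, h2⟩
  · omega
  · omega
  · have ha' : a < grid.length := by omega
    refine ⟨ha', ?_⟩
    have hmem : grid[a] ∈ grid.take rows.toNat := by
      have hlt : a < (grid.take rows.toNat).length := by
        rw [List.length_take]; omega
      have : (grid.take rows.toNat)[a] = grid[a] := List.getElem_take
      rw [← this]
      exact List.getElem_mem hlt
    have := h2 _ hmem
    rw [List.getD_eq_getElem grid [] ha']
    omega

-- ===== VERDICT (by name: the statement is the Claim_ definition above) =====
theorem step_spec : Claim_equal_step := by
  intro grid rows cols det _hdom hpre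
  unfold Spec_step
  have hF : Frame grid rows cols := frame_of_pre grid rows cols det hpre
  cases det
  · -- increment step
    refine grids_ext _ _ grid ?_ ?_ ?_
    · rw [stepA_false]; exact incOuter_sh rows.toNat cols.toNat grid
    · rw [stepB_false]
      exact setOuter_sh rows.toNat cols.toNat (fun r c => cell2 grid r c + 1) grid
    · intro i j hi hj
      rw [stepA_false, incOuter rows.toNat cols.toNat grid i j, stepB_false,
        setOuter (fun r c => cell2 grid r c + 1) cols.toNat rows.toNat grid i j]
  · -- detonate step
    refine grids_ext _ _ grid ?_ ?_ ?_
    · rw [stepA_true]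
      exact detOuter_sh grid rows cols rows.toNat cols.toNat grid
    · rw [stepB_true]
      exact setOuter_sh rows.toNat cols.toNat _ grid
    · intro i j hi hj
      rw [stepA_true,
        detOuter grid rows cols cols.toNat le_rfl rows.toNat le_rfl grid i j hF,
        stepB_true,
        setOuter (fun r c => if pvBoom grid rows cols (r : Int) (c : Int) then 0 else cell2 grid r c)
          cols.toNat rows.toNat grid i j]
      by_cases hin : i < rows.toNat ∧ j < cols.toNat
      · have hblock : i < rows.toNat ∧ j < cols.toNat ∧ i < grid.length ∧
            j < (grid.getD i []).length := ⟨hin.1, hin.2, hi, hj⟩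
        rw [if_pos hblock]
        have hb := boom_iff grid rows cols i j hin.1 hin.2
        by_cases hbm : pvBoom grid rows cols (i : Int) (j : Int) = true
        · rw [if_pos hbm, if_pos (hb.mp hbm)]
        · rw [if_neg hbm, if_neg (fun hx => hbm (hb.mpr hx))]
      · have hnb : ¬(i < rows.toNat ∧ j < cols.toNat ∧ i < grid.length ∧
            j < (grid.getD i []).length) := fun hc => hin ⟨hc.1, hc.2.1⟩
        rw [if_neg hnb]
        refine if_neg ?_
        rintro ⟨r, hr, c, hc, -, hmem⟩
        obtain ⟨-, -, h3, h4⟩ := nbrs_inframe rows cols r c hr hc _ hmem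
        simp only [Int.toNat_natCast] at h3 h4
        exact hin ⟨h3, h4⟩
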